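-- pv_equiv track=rewrite | github.com/FlyingRan/CACA_CODE | models/dataloader.py | get_subject_labels
-- ===== SOURCE A (Python) =====
-- def get_spans(tags):
--     '''for BIO tag'''
--     tags = tags.strip().split()
--     length = len(tags)
--     spans = []
--     start = -1
--     for i in range(length):
--         if tags[i].endswith('B'):
--             if start != -1:
--                 spans.append([start, i - 1])
--             start = i
--         elif tags[i].endswith('O'):
--             if start != -1:
--                 spans.append([start, i - 1])
--                 start = -1
--     if start != -1:
--         spans.append([start, length - 1])
--     return spans
--
-- def get_subject_labels(tags):
--     '''for BIO tag'''
--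
--     label = {}
--     subject_span = get_spans(tags)[0]
--     tags = tags.strip().split()
--     sentence = []
--     for tag in tags:
--         sentence.append(tag.strip().split('\\')[0])
--     word = ' '.join(sentence[subject_span[0]:subject_span[1] + 1])
--     label[word] = subject_span
--     return label
-- ===== SOURCE B (Python) =====
-- def get_subject_labels(tags):
--     '''for BIO tag: single scan for the first span only (no full span list)'''
--     tokens = tags.strip().split()
--     start = next(i for i, t in enumerate(tokens) if t.endswith('B'))
--     end = len(tokens) - 1
--     for j in range(start + 1, len(tokens)):
--         if tokens[j].endswith('B') or tokens[j].endswith('O'):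
--             end = j - 1
--             break
--     sentence = [t.split('\\')[0] for t in tokens]
--     word = ' '.join(sentence[start:end + 1])
--     return {word: [start, end]}
-- ===== Notes on version B (the rewrite author's own statement) =====
-- stated objective: alternative
-- what changed: B finds the first span by a single early-exit scan (first tag ending 'B', then the next tag ending 'B' or 'O') instead of building the whole span list via get_spans and taking element [0]; Pre_ excludes inputs with no token ending in 'B', where both A and B raise.
import Mathlib
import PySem

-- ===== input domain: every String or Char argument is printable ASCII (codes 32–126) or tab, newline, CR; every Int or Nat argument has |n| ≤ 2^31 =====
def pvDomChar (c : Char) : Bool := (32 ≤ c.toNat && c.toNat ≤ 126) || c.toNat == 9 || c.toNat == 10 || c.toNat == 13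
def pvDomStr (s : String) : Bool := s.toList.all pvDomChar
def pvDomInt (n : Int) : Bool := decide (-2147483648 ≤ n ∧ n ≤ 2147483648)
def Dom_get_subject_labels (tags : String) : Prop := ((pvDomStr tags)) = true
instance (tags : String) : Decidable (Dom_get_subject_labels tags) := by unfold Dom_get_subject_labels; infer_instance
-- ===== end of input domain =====

-- B replaces the full get_spans span list (of which A keeps only element [0]) by one
-- early-exit scan for the first span: same O(n) cost, different decomposition.

-- ===== PORT A =====
-- loop body of get_spans's 'for i in range(length)' (state: (spans, start))
def pvStepA (st : List (List Int) × Int) (p : Int × String) : List (List Int) × Int :=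
  if PySem.Str.endswith p.2 "B" then
    ((if st.2 ≠ -1 then st.1 ++ [[st.2, p.1 - 1]] else st.1), p.1)
  else if PySem.Str.endswith p.2 "O" then
    ((if st.2 ≠ -1 then st.1 ++ [[st.2, p.1 - 1]] else st.1), -1)
  else st

def get_spans (tags : String) : List (List Int) :=
  let ts := PySem.Str.split₀ (PySem.Str.strip tags)
  let length := ts.length
  let r := (PySem.List.enumerate ts).foldl pvStepA ([], -1)
  if r.2 ≠ -1 then r.1 ++ [[r.2, (length : Int) - 1]] else r.1

def get_subject_labels (tags : String) : List (String × List Int) :=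
  match PySem.List.pyGet? (get_spans tags) 0 with
  | none => []  -- get_spans(tags)[0] raises IndexError here; excluded by Pre_
  | some subject_span =>
    let ts := PySem.Str.split₀ (PySem.Str.strip tags)
    let sentence := ts.foldl
      (fun acc tag => acc ++ [PySem.List.pyGetD ((PySem.Str.split? (PySem.Str.strip tag) "\\").getD []) 0 ""]) []
    let word := PySem.Str.join " "
      (PySem.List.slice sentence (some (PySem.List.pyGetD subject_span 0 0))
        (some (PySem.List.pyGetD subject_span 1 0 + 1)))
    [(word, subject_span)]

-- ===== PORT B =====
-- next(i for i, t in enumerate(tokens) if t.endswith('B'))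
def pvFirstB : List String → Nat → Option Nat
  | [], _ => none
  | t :: r, i => if PySem.Str.endswith t "B" then some i else pvFirstB r (i + 1)

-- 'for j in range(start+1, len(tokens)): if … : end = j-1; break' — scan of the suffix
def pvFindEnd : List String → Nat → Int → Int
  | [], _, e => e
  | t :: r, j, e =>
    if PySem.Str.endswith t "B" || PySem.Str.endswith t "O" then (j : Int) - 1
    else pvFindEnd r (j + 1) e

def get_subject_labels_alt (tags : String) : List (String × List Int) :=
  let tokens := PySem.Str.split₀ (PySem.Str.strip tags)
  match pvFirstB tokens 0 with
  | none => []  -- next(…) raises StopIteration here; excluded by Pre_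
  | some s =>
    let e := pvFindEnd (tokens.drop (s + 1)) (s + 1) ((tokens.length : Int) - 1)
    let sentence := tokens.map (fun t => PySem.List.pyGetD ((PySem.Str.split? t "\\").getD []) 0 "")
    let word := PySem.Str.join " " (PySem.List.slice sentence (some (s : Int)) (some (e + 1)))
    [(word, [(s : Int), e])]

-- ===== PRECONDITION & SPEC =====
-- Pre_ excludes exactly the inputs where no whitespace-separated token ends in 'B':
-- there A raises IndexError (and B raises StopIteration).
def Pre_get_subject_labels (tags : String) : Prop :=
  (PySem.Str.split₀ (PySem.Str.strip tags)).any (fun t => PySem.Str.endswith t "B") = true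
instance (tags : String) : Decidable (Pre_get_subject_labels tags) := by
  unfold Pre_get_subject_labels; infer_instance

def pvWitness_get_subject_labels : String := "the\\D dog\\B barks\\O"

def Spec_get_subject_labels (tags : String) (out : List (String × List Int)) : Prop := out = get_subject_labels_alt tags
instance (tags : String) (out : List (String × List Int)) : Decidable (Spec_get_subject_labels tags out) := by unfold Spec_get_subject_labels; infer_instance

-- ===== CLAIM (what is proved, stated in full; the proofs are below) =====
def Claim_equal_get_subject_labels : Prop := ∀ (tags : String), Dom_get_subject_labels tags → Pre_get_subject_labels tags → Spec_get_subject_labels tags (get_subject_labels tags)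

-- ===== LEMMAS AND PROOFS =====

-- A's whole get_spans computation, parametrised by the start index of the enumeration
def pvFinal (l : List String) (s : Int) (st : List (List Int) × Int) : List (List Int) :=
  let r := (PySem.List.enumerate l s).foldl pvStepA st
  if r.2 ≠ -1 then r.1 ++ [[r.2, s + l.length - 1]] else r.1

theorem pvFinal_eq_get_spans (tags : String) :
    get_spans tags = pvFinal (PySem.Str.split₀ (PySem.Str.strip tags)) 0 ([], -1) := by
  unfold get_spans pvFinal
  simp only [zero_add]

theorem pvFinal_cons (t : String) (r : List String) (s : Int) (st : List (List Int) × Int) :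
    pvFinal (t :: r) s st = pvFinal r (s + 1) (pvStepA st (s, t)) := by
  unfold pvFinal
  rw [PySem.List.enumerate_cons, List.foldl_cons]
  have h : s + ((t :: r).length : Int) - 1 = (s + 1) + (r.length : Int) - 1 := by
    push_cast [List.length_cons]; ring
  rw [h]

-- the fold only ever appends to the accumulated span list
theorem pvFoldA_mono (l : List String) (s : Int) (spans : List (List Int)) (st : Int) :
    ∃ ext, ((PySem.List.enumerate l s).foldl pvStepA (spans, st)).1 = spans ++ ext := by
  induction l generalizing s spans st with
  | nil => exact ⟨[], by simp [PySem.List.enumerate_nil]⟩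
  | cons t r ih =>
    rw [PySem.List.enumerate_cons, List.foldl_cons]
    rcases h2 : pvStepA (spans, st) (s, t) with ⟨spans', st'⟩
    have hsp : spans' = spans ∨ ∃ x, spans' = spans ++ [x] := by
      unfold pvStepA at h2
      split_ifs at h2 <;> injection h2 with ha hb <;> subst ha <;>
        first | exact Or.inl rfl | exact Or.inr ⟨_, rfl⟩
    obtain ⟨ext, hext⟩ := ih (s + 1) spans' st'
    rcases hsp with h | ⟨x, h⟩
    · exact ⟨ext, by rw [hext, h]⟩
    · exact ⟨[x] ++ ext, by rw [hext, h, List.append_assoc]⟩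

theorem pvFinal_mono (l : List String) (s : Int) (spans : List (List Int)) (st : Int) :
    ∃ ext, pvFinal l s (spans, st) = spans ++ ext := by
  obtain ⟨ext, hext⟩ := pvFoldA_mono l s spans st
  unfold pvFinal
  by_cases h : ((PySem.List.enumerate l s).foldl pvStepA (spans, st)).2 ≠ -1
  · exact ⟨ext ++ [[((PySem.List.enumerate l s).foldl pvStepA (spans, st)).2, s + l.length - 1]],
      by simp [h, hext]⟩
  · exact ⟨ext, by simp [h, hext]⟩

-- once a span is open at 'start', the first span recorded from here on is
-- [start, pvFindEnd …]: exactly the scan B performs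
theorem pvFinal_open (l : List String) (j : Nat) (spans : List (List Int)) (start : Int)
    (hst : start ≠ -1) :
    (pvFinal l (j : Int) (spans, start)).head? =
      (spans ++ [[start, pvFindEnd l j ((j : Int) + l.length - 1)]]).head? := by
  induction l generalizing j spans start with
  | nil =>
    simp [pvFinal, PySem.List.enumerate_nil, pvFindEnd, hst]
  | cons t r ih =>
    rw [pvFinal_cons]
    by_cases hB : PySem.Chars.endswith t.toList ['B'] = true
    · have hstep : pvStepA (spans, start) ((j : Int), t)
          = (spans ++ [[start, (j : Int) - 1]], (j : Int)) := by
        simp [pvStepA, hB, hst]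
      rw [hstep, show (j : Int) + 1 = ((j + 1 : Nat) : Int) by push_cast; ring]
      rw [ih (j + 1) _ (j : Int) (by omega)]
      have hfe : pvFindEnd (t :: r) j ((j : Int) + ((t :: r).length : Int) - 1) = (j : Int) - 1 := by
        simp [pvFindEnd, hB]
      rw [hfe]
      cases spans <;> simp
    · by_cases hO : PySem.Chars.endswith t.toList ['O'] = true
      · have hstep : pvStepA (spans, start) ((j : Int), t)
            = (spans ++ [[start, (j : Int) - 1]], -1) := by
          simp [pvStepA, hB, hO, hst]
        rw [hstep]
        obtain ⟨ext, hext⟩ := pvFinal_mono r ((j : Int) + 1) (spans ++ [[start, (j : Int) - 1]]) (-1)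
        rw [hext]
        have hfe : pvFindEnd (t :: r) j ((j : Int) + ((t :: r).length : Int) - 1) = (j : Int) - 1 := by
          simp [pvFindEnd, hB, hO]
        rw [hfe]
        cases spans <;> simp
      · have hstep : pvStepA (spans, start) ((j : Int), t) = (spans, start) := by
          simp [pvStepA, hB, hO]
        rw [hstep, show (j : Int) + 1 = ((j + 1 : Nat) : Int) by push_cast; ring]
        rw [ih (j + 1) spans start hst]
        have hfe : pvFindEnd (t :: r) j ((j : Int) + ((t :: r).length : Int) - 1)
            = pvFindEnd r (j + 1) (((j + 1 : Nat) : Int) + (r.length : Int) - 1) := by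
          have h2 : (j : Int) + ((t :: r).length : Int) - 1
              = ((j + 1 : Nat) : Int) + (r.length : Int) - 1 := by push_cast [List.length_cons]; ring
          rw [h2]; simp [pvFindEnd, hB, hO]
        rw [hfe]

theorem pvFirstB_ge (l : List String) (j s : Nat) (h : pvFirstB l j = some s) : j ≤ s := by
  induction l generalizing j with
  | nil => simp [pvFirstB] at h
  | cons t r ih =>
    unfold pvFirstB at h
    split_ifs at h
    · injection h with h; omega
    · have := ih (j + 1) h; omega

-- from the closed initial state, the head of A's span list is B's span
theorem pvFinal_closed (l : List String) (j : Nat) :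
    (pvFinal l (j : Int) ([], -1)).head? =
      (pvFirstB l j).map
        (fun (s : Nat) => [(s : Int), pvFindEnd (l.drop (s + 1 - j)) (s + 1) ((j : Int) + l.length - 1)]) := by
  induction l generalizing j with
  | nil => simp [pvFinal, PySem.List.enumerate_nil, pvFirstB]
  | cons t r ih =>
    rw [pvFinal_cons]
    by_cases hB : PySem.Chars.endswith t.toList ['B'] = true
    · have hstep : pvStepA (([] : List (List Int)), -1) ((j : Int), t) = ([], (j : Int)) := by
        simp [pvStepA, hB]
      rw [hstep, show (j : Int) + 1 = ((j + 1 : Nat) : Int) by push_cast; ring]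
      rw [pvFinal_open r (j + 1) [] (j : Int) (by omega)]
      have hfb : pvFirstB (t :: r) j = some j := by simp [pvFirstB, hB]
      rw [hfb]
      simp
      congr 1
      ring
    · have hstep : pvStepA (([] : List (List Int)), -1) ((j : Int), t) = ([], -1) := by
        by_cases hO : PySem.Chars.endswith t.toList ['O'] = true <;> simp [pvStepA, hB, hO]
      rw [hstep, show (j : Int) + 1 = ((j + 1 : Nat) : Int) by push_cast; ring]
      rw [ih (j + 1)]
      have hfb : pvFirstB (t :: r) j = pvFirstB r (j + 1) := by simp [pvFirstB, hB]
      rw [hfb]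
      cases hs : pvFirstB r (j + 1) with
      | none => simp
      | some s =>
        have hge := pvFirstB_ge r (j + 1) s hs
        have hdrop : (t :: r).drop (s + 1 - j) = r.drop (s + 1 - (j + 1)) := by
          rw [show s + 1 - j = (s + 1 - (j + 1)) + 1 by omega]; rfl
        have hlen : (j : Int) + ((t :: r).length : Int) - 1
            = ((j + 1 : Nat) : Int) + (r.length : Int) - 1 := by push_cast [List.length_cons]; ring
        simp [hdrop]
        congr 1
        ring

-- if pvFirstB finds nothing, no token ends with 'B'
theorem pvFirstB_none (l : List String) (j : Nat) (h : pvFirstB l j = none) :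
    ∀ t ∈ l, PySem.Str.endswith t "B" = false := by
  induction l generalizing j with
  | nil => simp
  | cons t r ih =>
    unfold pvFirstB at h
    split_ifs at h with hB
    intro u hu
    rcases List.mem_cons.mp hu with rfl | hu
    · simpa using hB
    · exact ih (j + 1) h u hu

-- every character of a token produced by split() is non-whitespace
theorem pv_go_nospace (rest : List Char) :
    ∀ (cur : List Char) (acc : List (List Char)),
      (∀ c ∈ cur, PySem.Chars.isspace c = false) →
      (∀ l ∈ acc, ∀ c ∈ l, PySem.Chars.isspace c = false) →
      ∀ l ∈ PySem.Chars.split₀.go rest cur acc, ∀ c ∈ l, PySem.Chars.isspace c = false := by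
  induction rest with
  | nil =>
    intro cur acc hcur hacc l hl
    unfold PySem.Chars.split₀.go at hl
    split_ifs at hl with h
    · simp only [List.mem_reverse] at hl
      exact hacc l hl
    · simp only [List.mem_reverse, List.mem_cons] at hl
      rcases hl with h1 | h1
      · subst h1; intro c hc; exact hcur c (by simpa using hc)
      · exact hacc l h1
  | cons c rest ih =>
    intro cur acc hcur hacc l hl
    unfold PySem.Chars.split₀.go at hl
    split_ifs at hl with hsp hemp
    · exact ih [] acc (by simp) hacc l hl
    · refine ih [] (cur.reverse :: acc) (by simp) ?_ l hl
      intro l' hl'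
      rcases List.mem_cons.mp hl' with rfl | hl'
      · intro c' hc'; exact hcur c' (by simpa using hc')
      · exact hacc l' hl'
    · refine ih (c :: cur) acc ?_ hacc l hl
      intro c' hc'
      rcases List.mem_cons.mp hc' with rfl | hc'
      · simpa using hsp
      · exact hcur c' hc'

theorem pv_strip_token (s t : String) (ht : t ∈ PySem.Str.split₀ s) :
    PySem.Str.strip t = t := by
  unfold PySem.Str.split₀ at ht
  simp only [List.mem_map] at ht
  obtain ⟨cs, hcs, rfl⟩ := ht
  have hns : ∀ c ∈ cs, PySem.Chars.isspace c = false := by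
    have := pv_go_nospace s.toList [] [] (by simp) (by simp)
    unfold PySem.Chars.split₀ at hcs
    exact this cs hcs
  have hid : ∀ (l : List Char), (∀ c ∈ l, PySem.Chars.isspace c = false) →
      List.dropWhile PySem.Chars.isspace l = l := by
    intro l hl
    cases l with
    | nil => rfl
    | cons a l =>
      rw [List.dropWhile_cons_of_neg]
      simp [hl a (by simp)]
  unfold PySem.Str.strip PySem.Chars.strip PySem.Chars.lstrip PySem.Chars.rstrip
  rw [String.toList_ofList, hid cs hns, hid cs.reverse (by intro c hc; exact hns c (by simpa using hc)),
    List.reverse_reverse]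
  -- String.ofList (String.ofList cs).toList = String.ofList cs? already rewritten: goal ofList cs = ofList cs
  -- (handled by the rewrites above)

-- ===== VERDICT (by name: the statement is the Claim_ definition above) =====
theorem get_subject_labels_spec : Claim_equal_get_subject_labels := by
  intro tags _ hpre
  unfold Spec_get_subject_labels
  unfold Pre_get_subject_labels at hpre
  cases hfb : pvFirstB (PySem.Str.split₀ (PySem.Str.strip tags)) 0 with
  | none =>
    rw [List.any_eq_true] at hpre
    obtain ⟨t, ht, hB⟩ := hpre
    have hnone := pvFirstB_none _ 0 hfb t ht
    simp_all
  | some s =>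
    have hhead := pvFinal_closed (PySem.Str.split₀ (PySem.Str.strip tags)) 0
    rw [hfb, show ((0 : Nat) : Int) = 0 by simp, ← pvFinal_eq_get_spans] at hhead
    simp only [Option.map_some, Nat.sub_zero, zero_add] at hhead
    have hpg : PySem.List.pyGet? (get_spans tags) 0 =
        some [(s : Int), pvFindEnd ((PySem.Str.split₀ (PySem.Str.strip tags)).drop (s + 1)) (s + 1)
          (((PySem.Str.split₀ (PySem.Str.strip tags)).length : Int) - 1)] := by
      rw [PySem.List.pyGet?_zero, ← List.head?_eq_getElem?, hhead]
    have hsent :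
        (PySem.Str.split₀ (PySem.Str.strip tags)).foldl
          (fun acc tag => acc ++ [PySem.List.pyGetD ((PySem.Str.split? (PySem.Str.strip tag) "\\").getD []) 0 ""]) []
        = (PySem.Str.split₀ (PySem.Str.strip tags)).map
            (fun t => PySem.List.pyGetD ((PySem.Str.split? t "\\").getD []) 0 "") := by
      rw [PySem.List.foldl_append_singleton_eq_map]
      rw [List.nil_append]
      refine List.map_congr_left ?_
      intro t ht
      rw [pv_strip_token _ t ht]
    simp only [get_subject_labels, get_subject_labels_alt, hpg, hfb, hsent,
      PySem.List.pyGetD_zero_cons]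
    have h1 : ∀ (a b : Int), PySem.List.pyGetD [a, b] 1 0 = b := by
      intro a b; simp [pysem]
    rw [h1]
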